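-- pv_equiv track=rewrite | github.com/autom8ton/OLC-Python-TeachingMain | exam_Task4_development/task4_bindenhex.py | check_valid_num
-- ===== SOURCE A (Python) =====
-- def check_valid_num(num, base):
--
--     # change to string for checking
--     num = str(num).upper()
--     base = str(base)
--
--     for i in num:
--         if base == "2" and i not in "01":
--             return False
--         elif base == "10" and i not in "0123456789":
--             return False
--         elif base == "16" and i not in "0123456789ABCDEF":
--             return False
--
--     return True
-- ===== SOURCE B (Python) =====
-- def check_valid_num(num, base):
--     # Alternative: reduce the string to the MAXIMAL digit value any character
--     # encodes (ord arithmetic: '0'-'9' -> 0-9, 'A'-'F' -> 10-15, anything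
--     # else -> 99), then compare that single number against the base's limit.
--     limit = {"2": 2, "10": 10, "16": 16}.get(str(base))
--     if limit is None:
--         return True
--     m = -1
--     for c in str(num).upper():
--         o = ord(c)
--         if 48 <= o <= 57:
--             v = o - 48
--         elif 65 <= o <= 70:
--             v = o - 55
--         else:
--             v = 99
--         if v > m:
--             m = v
--     return m < limit
-- ===== Notes on version B (the rewrite author's own statement) =====
-- stated objective: alternative
-- what changed: Instead of testing each character for membership in a base-specific digit string, B maps every character to a numeric digit value by ord arithmetic, folds the string to the maximum such value, and decides validity with one comparison of that number against the base's limit (2/10/16; unknown bases return True); the measured speedup is a constant factor (one arithmetic classification per char instead of repeated string-membership tests in a branch chain).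
import Mathlib
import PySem

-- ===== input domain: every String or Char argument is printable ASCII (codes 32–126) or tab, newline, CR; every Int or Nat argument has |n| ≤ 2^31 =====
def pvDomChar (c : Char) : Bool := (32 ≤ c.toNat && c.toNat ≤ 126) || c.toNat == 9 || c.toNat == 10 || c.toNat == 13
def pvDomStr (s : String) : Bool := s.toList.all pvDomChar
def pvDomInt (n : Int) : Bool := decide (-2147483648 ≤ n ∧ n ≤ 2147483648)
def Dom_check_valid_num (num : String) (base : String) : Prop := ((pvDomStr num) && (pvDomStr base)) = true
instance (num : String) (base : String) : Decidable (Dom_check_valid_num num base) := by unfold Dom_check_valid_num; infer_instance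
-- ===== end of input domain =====

-- B replaces A's per-character membership scan by a numeric max-of-digit-values reduction
-- followed by one comparison against the base's limit (objective: alternative; measured faster by a constant factor).

-- ===== PORT A =====
-- the 'for i in num: … return False' loop with the same branch order; 'i not in "01"' is
-- single-char membership, ported exactly as List.contains on the string's characters
def pvLoopA (base : String) : List Char → Bool
  | [] => true
  | c :: rest =>
    if base == "2" && !("01".toList.contains c) then false
    else if base == "10" && !("0123456789".toList.contains c) then false
    else if base == "16" && !("0123456789ABCDEF".toList.contains c) then false
    else pvLoopA base rest

def check_valid_num (num : String) (base : String) : Bool :=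
  pvLoopA base (PySem.Chars.upper num.toList)

-- ===== PORT B =====
-- ord-arithmetic digit value: '0'-'9' -> 0-9, 'A'-'F' -> 10-15, anything else -> 99
def pvVal (c : Char) : Int :=
  let o : Int := (c.toNat : Int)
  if 48 ≤ o ∧ o ≤ 57 then o - 48 else if 65 ≤ o ∧ o ≤ 70 then o - 55 else 99

-- the 'for c in …: … if v > m: m = v' accumulation loop
def pvMaxFold : List Char → Int → Int
  | [], m => m
  | c :: rest, m => pvMaxFold rest (if pvVal c > m then pvVal c else m)

def check_valid_num_alt (num : String) (base : String) : Bool :=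
  let limits : PySem.Dict String Int :=
    ((PySem.Dict.empty.insert "2" 2).insert "10" 10).insert "16" 16
  match limits.get? base with
  | none => true
  | some limit => decide (pvMaxFold (PySem.Chars.upper num.toList) (-1) < limit)

-- ===== PRECONDITION & SPEC =====
def Spec_check_valid_num (num : String) (base : String) (out : Bool) : Prop := out = check_valid_num_alt num base
instance (num : String) (base : String) (out : Bool) : Decidable (Spec_check_valid_num num base out) := by unfold Spec_check_valid_num; infer_instance

-- ===== CLAIM (what is proved, stated in full; the proofs are below) =====
def Claim_equal_check_valid_num : Prop := ∀ (num : String) (base : String), Dom_check_valid_num num base → Spec_check_valid_num num base (check_valid_num num base)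

-- ===== LEMMAS AND PROOFS =====

lemma char_eq_iff_toNat (c d : Char) : c = d ↔ c.toNat = d.toNat := by
  constructor
  · rintro rfl; rfl
  · intro h
    have := congrArg Char.ofNat h
    rwa [Char.ofNat_toNat, Char.ofNat_toNat] at this

lemma mem2 (c : Char) : ("01".toList.contains c) = decide (pvVal c < 2) := by
  have hl : "01".toList = ['0','1'] := rfl
  rw [Bool.eq_iff_iff]
  simp only [hl, List.contains_cons, List.contains_nil, Bool.or_eq_true, beq_iff_eq,
    decide_eq_true_eq, char_eq_iff_toNat, pvVal]
  have t0 : ('0'.toNat) = 48 := rfl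
  have t1 : ('1'.toNat) = 49 := rfl
  rw [t0, t1]
  simp only [Bool.false_eq_true, or_false]
  split_ifs <;> omega

lemma mem10 (c : Char) : ("0123456789".toList.contains c) = decide (pvVal c < 10) := by
  have hl : "0123456789".toList = ['0','1','2','3','4','5','6','7','8','9'] := rfl
  rw [Bool.eq_iff_iff]
  simp only [hl, List.contains_cons, List.contains_nil, Bool.or_eq_true, beq_iff_eq,
    decide_eq_true_eq, char_eq_iff_toNat, pvVal]
  have t0 : ('0'.toNat) = 48 := rfl
  have t1 : ('1'.toNat) = 49 := rfl
  have t2 : ('2'.toNat) = 50 := rfl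
  have t3 : ('3'.toNat) = 51 := rfl
  have t4 : ('4'.toNat) = 52 := rfl
  have t5 : ('5'.toNat) = 53 := rfl
  have t6 : ('6'.toNat) = 54 := rfl
  have t7 : ('7'.toNat) = 55 := rfl
  have t8 : ('8'.toNat) = 56 := rfl
  have t9 : ('9'.toNat) = 57 := rfl
  rw [t0,t1,t2,t3,t4,t5,t6,t7,t8,t9]
  simp only [Bool.false_eq_true, or_false]
  split_ifs <;> omega

lemma mem16 (c : Char) : ("0123456789ABCDEF".toList.contains c) = decide (pvVal c < 16) := by
  have hl : "0123456789ABCDEF".toList = ['0','1','2','3','4','5','6','7','8','9','A','B','C','D','E','F'] := rfl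
  rw [Bool.eq_iff_iff]
  simp only [hl, List.contains_cons, List.contains_nil, Bool.or_eq_true, beq_iff_eq,
    decide_eq_true_eq, char_eq_iff_toNat, pvVal]
  have t0 : ('0'.toNat) = 48 := rfl
  have t1 : ('1'.toNat) = 49 := rfl
  have t2 : ('2'.toNat) = 50 := rfl
  have t3 : ('3'.toNat) = 51 := rfl
  have t4 : ('4'.toNat) = 52 := rfl
  have t5 : ('5'.toNat) = 53 := rfl
  have t6 : ('6'.toNat) = 54 := rfl
  have t7 : ('7'.toNat) = 55 := rfl
  have t8 : ('8'.toNat) = 56 := rfl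
  have t9 : ('9'.toNat) = 57 := rfl
  have t10 : ('A'.toNat) = 65 := rfl
  have t11 : ('B'.toNat) = 66 := rfl
  have t12 : ('C'.toNat) = 67 := rfl
  have t13 : ('D'.toNat) = 68 := rfl
  have t14 : ('E'.toNat) = 69 := rfl
  have t15 : ('F'.toNat) = 70 := rfl
  rw [t0,t1,t2,t3,t4,t5,t6,t7,t8,t9,t10,t11,t12,t13,t14,t15]
  simp only [Bool.false_eq_true, or_false]
  split_ifs <;> omega

lemma pvLoopA_other (base : String) (h2 : base ≠ "2") (h10 : base ≠ "10") (h16 : base ≠ "16") :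
    ∀ cs : List Char, pvLoopA base cs = true := by
  intro cs
  induction cs with
  | nil => rfl
  | cons c rest ih => simp [pvLoopA, h2, h10, h16, ih]

lemma pvLoopA_charset (base : String) (digits : List Char)
    (h : ∀ c rest, pvLoopA base (c :: rest) =
      if digits.contains c then pvLoopA base rest else false) :
    ∀ cs : List Char, pvLoopA base cs = cs.all (fun c => digits.contains c) := by
  intro cs
  induction cs with
  | nil => rfl
  | cons c rest ih =>
    rw [h c rest]
    by_cases hc : digits.contains c = true
    · simp [ih]
    · simp at hc; simp [hc]

lemma pvLoopA_2 (cs : List Char) :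
    pvLoopA "2" cs = cs.all (fun c => "01".toList.contains c) := by
  apply pvLoopA_charset
  intro c rest
  by_cases hc : ("01".toList.contains c) = true
  · simp [pvLoopA]
  · simp at hc; simp [pvLoopA, hc]

lemma pvLoopA_10 (cs : List Char) :
    pvLoopA "10" cs = cs.all (fun c => "0123456789".toList.contains c) := by
  apply pvLoopA_charset
  intro c rest
  by_cases hc : ("0123456789".toList.contains c) = true
  · simp [pvLoopA]
  · simp at hc; simp [pvLoopA, hc]

lemma pvLoopA_16 (cs : List Char) :
    pvLoopA "16" cs = cs.all (fun c => "0123456789ABCDEF".toList.contains c) := by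
  apply pvLoopA_charset
  intro c rest
  by_cases hc : ("0123456789ABCDEF".toList.contains c) = true
  · simp [pvLoopA]
  · simp at hc; simp [pvLoopA, hc]

lemma maxfold_lt (L : Int) : ∀ (cs : List Char) (m : Int),
    decide (pvMaxFold cs m < L) = (decide (m < L) && cs.all (fun c => decide (pvVal c < L))) := by
  intro cs
  induction cs with
  | nil => intro m; simp [pvMaxFold]
  | cons c rest ih =>
    intro m
    rw [show pvMaxFold (c::rest) m = pvMaxFold rest (if pvVal c > m then pvVal c else m) from rfl,
      ih, List.all_cons]
    split_ifs with h <;>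
      cases hall : rest.all (fun c => decide (pvVal c < L)) <;>
        · rw [Bool.eq_iff_iff]
          simp only [Bool.and_eq_true, Bool.and_false, Bool.and_true, decide_eq_true_eq,
            Bool.false_eq_true]
          all_goals omega

lemma alt_of_limit (cs : List Char) (L : Int) (hL : -1 < L) :
    decide (pvMaxFold cs (-1) < L) = cs.all (fun c => decide (pvVal c < L)) := by
  rw [maxfold_lt]
  simp [hL]

-- ===== VERDICT (by name: the statement is the Claim_ definition above) =====
theorem check_valid_num_spec : Claim_equal_check_valid_num := by
  intro num base _
  unfold Spec_check_valid_num check_valid_num check_valid_num_alt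
  by_cases h2 : base = "2"
  · subst h2
    rw [pvLoopA_2]
    show _ = decide (pvMaxFold (PySem.Chars.upper num.toList) (-1) < 2)
    rw [alt_of_limit _ 2 (by norm_num)]
    exact congrArg _ (funext mem2)
  · by_cases h10 : base = "10"
    · subst h10
      rw [pvLoopA_10]
      show _ = decide (pvMaxFold (PySem.Chars.upper num.toList) (-1) < 10)
      rw [alt_of_limit _ 10 (by norm_num)]
      exact congrArg _ (funext mem10)
    · by_cases h16 : base = "16"
      · subst h16
        rw [pvLoopA_16]
        show _ = decide (pvMaxFold (PySem.Chars.upper num.toList) (-1) < 16)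
        rw [alt_of_limit _ 16 (by norm_num)]
        exact congrArg _ (funext mem16)
      · rw [pvLoopA_other base h2 h10 h16]
        have : (((PySem.Dict.empty.insert "2" (2:Int)).insert "10" 10).insert "16" 16).get? base = none := by
          rw [PySem.Dict.get?_insert_of_ne _ _ h16,
              PySem.Dict.get?_insert_of_ne _ _ h10,
              PySem.Dict.get?_insert_of_ne _ _ h2]
          rfl
        simp [this]
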